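-- pv_equiv track=rewrite | github.com/AnhTran1610/codility | asphalt_patches/asphalt_patches.py | solution
-- ===== SOURCE A (Python) =====
-- def solution(S):
--     count = 0
--     i = 0
--     while i < len(S):
--         if S[i] == 'X':
--             count += 1
--             if i + 2 >= len(S):
--                 break
--             i = i + 2
--         else:
--             i += 1
--     return count
-- ===== SOURCE B (Python) =====
-- def solution(S):
--     idx = [i for i, c in enumerate(S) if c == 'X']
--     count = 0
--     last = -2
--     for i in idx:
--         if i >= last + 2:
--             count += 1
--             last = i
--     return count
-- ===== Notes on version B (the rewrite author's own statement) =====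
-- stated objective: alternative
-- what changed: Replaces A's jump-cursor while-loop (advance by 2 after an X, else by 1, with an early break) by two passes: first materialize the list of X positions, then a greedy selection over those positions keeping the last selected index (start -2) and counting positions at distance >= 2.
import Mathlib
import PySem

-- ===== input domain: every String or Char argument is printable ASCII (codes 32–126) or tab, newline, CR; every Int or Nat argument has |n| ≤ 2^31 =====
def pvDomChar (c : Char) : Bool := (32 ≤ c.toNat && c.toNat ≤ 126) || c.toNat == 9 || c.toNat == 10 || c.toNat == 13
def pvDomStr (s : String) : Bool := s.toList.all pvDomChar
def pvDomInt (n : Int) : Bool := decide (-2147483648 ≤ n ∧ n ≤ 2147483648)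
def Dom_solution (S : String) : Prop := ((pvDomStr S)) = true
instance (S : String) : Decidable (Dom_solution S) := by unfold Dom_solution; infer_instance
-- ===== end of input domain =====

-- B replaces A's jump-cursor while-loop by an X-position list plus a greedy last-selected pass (alternative decomposition, same O(n) cost).

-- ===== PORT A =====
-- the while-loop: cursor i, advance by 2 after an X (break if past the end), else by 1
def solutionGoA (cs : List Char) (i : Nat) (count : Int) : Int :=
  if h : i < cs.length then
    if cs[i] = 'X' then
      if i + 2 ≥ cs.length then count + 1
      else solutionGoA cs (i + 2) (count + 1)
    else solutionGoA cs (i + 1) count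
  else count
termination_by cs.length - i

def solution (S : String) : Int := solutionGoA S.toList 0 0

-- ===== PORT B =====
def solution_alt (S : String) : Int :=
  let idx : List Int := ((PySem.List.enumerate S.toList 0).filter (fun p => p.2 = 'X')).map (·.1)
  (idx.foldl (fun st i => if i ≥ st.2 + 2 then (st.1 + 1, i) else st) ((0 : Int), (-2 : Int))).1

-- ===== PRECONDITION & SPEC =====
def Spec_solution (S : String) (out : Int) : Prop := out = solution_alt S
instance (S : String) (out : Int) : Decidable (Spec_solution S out) := by unfold Spec_solution; infer_instance

-- ===== CLAIM (what is proved, stated in full; the proofs are below) =====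
def Claim_equal_solution : Prop := ∀ (S : String), Dom_solution S → Spec_solution S (solution S)

-- ===== LEMMAS AND PROOFS =====

-- canonical count: select an X, then skip one position
def fCnt : List Char → Int
  | [] => 0
  | c :: rest => if c = 'X' then 1 + fCnt (rest.drop 1) else fCnt rest
termination_by cs => cs.length
decreasing_by
  all_goals (simp; try omega)

theorem goA_eq (cs : List Char) (i : Nat) (count : Int) :
    solutionGoA cs i count = count + fCnt (cs.drop i) := by
  generalize hn : cs.length - i = n
  induction n using Nat.strong_induction_on generalizing i count with
  | _ n ih =>
    rw [solutionGoA]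
    by_cases h : i < cs.length
    · have hdrop : cs.drop i = cs[i] :: cs.drop (i + 1) := (List.getElem_cons_drop h).symm
      simp only [h, dif_pos]
      by_cases hx : cs[i] = 'X'
      · rw [if_pos hx]
        have h12 : (cs.drop (i + 1)).drop 1 = cs.drop (i + 2) := by
          rw [List.drop_drop]
        by_cases hb : i + 2 ≥ cs.length
        · have hnil : cs.drop (i + 2) = [] := List.drop_eq_nil_of_le hb
          rw [if_pos hb, hdrop, fCnt, if_pos hx, h12, hnil]
          simp [fCnt]
        · rw [if_neg hb, ih (cs.length - (i + 2)) (by omega) (i + 2) (count + 1) rfl]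
          rw [hdrop, fCnt, if_pos hx, h12]
          omega
      · rw [if_neg hx, ih (cs.length - (i + 1)) (by omega) (i + 1) count rfl]
        rw [hdrop, fCnt, if_neg hx]
    · simp only [h, dif_neg, not_false_iff]
      have : cs.drop i = [] := List.drop_eq_nil_of_le (by omega)
      simp [this, fCnt]

def stepB : Int × Int → Int → Int × Int :=
  fun st i => if i ≥ st.2 + 2 then (st.1 + 1, i) else st

def idxOf (cs : List Char) (k : Int) : List Int :=
  ((PySem.List.enumerate cs k).filter (fun p => p.2 = 'X')).map (·.1)

theorem idxOf_nil (k : Int) : idxOf [] k = [] := by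
  simp [idxOf, PySem.List.enumerate_nil]

theorem idxOf_cons (c : Char) (cs : List Char) (k : Int) :
    idxOf (c :: cs) k = if c = 'X' then k :: idxOf cs (k + 1) else idxOf cs (k + 1) := by
  by_cases hx : c = 'X' <;>
    simp [idxOf, PySem.List.enumerate_cons, hx]

-- the simultaneous loop invariant for B's greedy pass:
-- P: last + 2 ≤ k (fresh), Q: last = k - 1 (the head position is still blocked)
theorem goB_inv (cs : List Char) :
    (∀ (k count last : Int), last + 2 ≤ k →
        (List.foldl stepB (count, last) (idxOf cs k)).1 = count + fCnt cs) ∧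
    (∀ (k count : Int),
        (List.foldl stepB (count, k - 1) (idxOf cs k)).1 = count + fCnt (cs.drop 1)) := by
  induction cs with
  | nil =>
    constructor
    · intro k count last _; simp [idxOf_nil, fCnt]
    · intro k count; simp [idxOf_nil, fCnt]
  | cons c cs ih =>
    obtain ⟨ihP, ihQ⟩ := ih
    constructor
    · intro k count last hfresh
      rw [idxOf_cons]
      by_cases hx : c = 'X'
      · rw [if_pos hx, List.foldl_cons]
        have hsel : stepB (count, last) k = (count + 1, k) := by
          simp [stepB, if_pos (by omega : k ≥ last + 2)]
        rw [hsel]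
        have := ihQ (k + 1) (count + 1)
        simp only [add_sub_cancel_right] at this
        rw [this, fCnt, if_pos hx]
        omega
      · rw [if_neg hx]
        rw [ihP (k + 1) count last (by omega), fCnt, if_neg hx]
    · intro k count
      rw [idxOf_cons]
      by_cases hx : c = 'X'
      · rw [if_pos hx, List.foldl_cons]
        have hskip : stepB (count, k - 1) k = (count, k - 1) := by
          simp [stepB, if_neg (by omega : ¬ k ≥ (k - 1) + 2)]
        rw [hskip]
        exact ihP (k + 1) count (k - 1) (by omega)
      · rw [if_neg hx]
        exact ihP (k + 1) count (k - 1) (by omega)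

-- ===== VERDICT (by name: the statement is the Claim_ definition above) =====
theorem solution_spec : Claim_equal_solution := by
  intro S _
  show solution S = solution_alt S
  rw [solution, goA_eq, solution_alt]
  simp only [List.drop_zero]
  have := (goB_inv S.toList).1 0 0 (-2) (by omega)
  rw [show ((PySem.List.enumerate S.toList 0).filter (fun p => p.2 = 'X')).map (·.1)
      = idxOf S.toList 0 from rfl]
  rw [show (fun (st : Int × Int) (i : Int) => if i ≥ st.2 + 2 then (st.1 + 1, i) else st) = stepB from rfl]
  omega
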